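-- pv_equiv track=rewrite | github.com/CojocaruDr/OmegaOptimizer | src/functions/functions.py | rhe
-- ===== SOURCE A (Python) =====
-- def rhe(values):
--     '''Function: Rotated hyper-ellipsoid'''
--     s = 0
--     for ii in range(len(values)):
--         ps = 0
--         for jj in range(ii + 1):
--             ps += values[jj]
--         s += ps ** 2
--     return (s)
-- ===== SOURCE B (Python) =====
-- def rhe(values):
--     '''Function: Rotated hyper-ellipsoid'''
--     s = 0
--     ps = 0
--     for v in values:
--         ps += v
--         s += ps * ps
--     return s
-- ===== Notes on version B (the rewrite author's own statement) =====
-- stated objective: faster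
-- what changed: Replaced the nested loop recomputing each prefix sum from scratch with a single pass that maintains a running prefix sum and adds its square.
import Mathlib
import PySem

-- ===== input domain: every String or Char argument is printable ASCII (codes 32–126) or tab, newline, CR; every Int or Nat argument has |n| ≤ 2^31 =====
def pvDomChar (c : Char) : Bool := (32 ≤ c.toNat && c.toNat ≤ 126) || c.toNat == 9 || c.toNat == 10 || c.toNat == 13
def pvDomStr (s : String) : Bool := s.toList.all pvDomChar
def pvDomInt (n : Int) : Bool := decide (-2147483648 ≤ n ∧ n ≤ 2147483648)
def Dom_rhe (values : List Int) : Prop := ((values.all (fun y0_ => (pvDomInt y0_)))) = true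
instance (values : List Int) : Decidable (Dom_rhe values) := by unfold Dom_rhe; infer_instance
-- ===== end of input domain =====

-- B replaces A's quadratic nested loop (recomputing each prefix sum from scratch)
-- with a single pass maintaining the running prefix sum (objective: faster).

-- ===== PORT A =====
def rhe (values : List Int) : Int :=
  (PySem.List.pyRange 0 values.length 1).foldl
    (fun s ii =>
      s + ((PySem.List.pyRange 0 (ii + 1) 1).foldl
             (fun ps jj => ps + PySem.List.pyGetD values jj 0) 0) ^ 2) 0

-- ===== PORT B =====
def rhe_alt (values : List Int) : Int :=
  (values.foldl (fun (st : Int × Int) v => (st.1 + v, st.2 + (st.1 + v) * (st.1 + v))) (0, 0)).2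

-- ===== PRECONDITION & SPEC =====
def Spec_rhe (values : List Int) (out : Int) : Prop := out = rhe_alt values
instance (values : List Int) (out : Int) : Decidable (Spec_rhe values out) := by unfold Spec_rhe; infer_instance

-- ===== CLAIM (what is proved, stated in full; the proofs are below) =====
def Claim_equal_rhe : Prop := ∀ (values : List Int), Dom_rhe values → Spec_rhe values (rhe values)

-- ===== LEMMAS AND PROOFS =====

-- B's fold carries the running prefix sum in its first component.
lemma alt_fst (l : List Int) (p s : Int) :
    (l.foldl (fun (st : Int × Int) v => (st.1 + v, st.2 + (st.1 + v) * (st.1 + v))) (p, s)).1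
      = p + l.sum := by
  induction l generalizing p s with
  | nil => simp
  | cons x xs ih => simp [List.foldl_cons, ih]; ring

lemma alt_append (l : List Int) (x : Int) :
    rhe_alt (l ++ [x]) = rhe_alt l + (l.sum + x) * (l.sum + x) := by
  unfold rhe_alt
  rw [List.foldl_append]
  set st := l.foldl (fun (st : Int × Int) v => (st.1 + v, st.2 + (st.1 + v) * (st.1 + v))) (0, 0) with hst
  have h1 : st.1 = l.sum := by rw [hst, alt_fst]; ring
  simp [h1]

lemma a_append (l : List Int) (x : Int) :
    rhe (l ++ [x]) = rhe l + (l.sum + x) * (l.sum + x) := by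
  unfold rhe
  have hlen : ((l ++ [x]).length : Int) = (l.length : Int) + 1 := by simp
  rw [hlen, PySem.List.pyRange_one_succ_right (by positivity), List.foldl_append]
  have hcongr :
      (PySem.List.pyRange 0 (l.length : Int) 1).foldl
        (fun s ii =>
          s + ((PySem.List.pyRange 0 (ii + 1) 1).foldl
                 (fun ps jj => ps + PySem.List.pyGetD (l ++ [x]) jj 0) 0) ^ 2) 0
      = (PySem.List.pyRange 0 (l.length : Int) 1).foldl
        (fun s ii =>
          s + ((PySem.List.pyRange 0 (ii + 1) 1).foldl
                 (fun ps jj => ps + PySem.List.pyGetD l jj 0) 0) ^ 2) 0 := by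
    apply PySem.List.foldl_congr_mem
    intro acc ii hii
    rw [PySem.List.mem_pyRange_one] at hii
    congr 1
    congr 1
    apply PySem.List.foldl_congr_mem
    intro ps jj hjj
    rw [PySem.List.mem_pyRange_one] at hjj
    have h0 : (0:Int) ≤ jj := hjj.1
    have h1 : jj < (l.length : Int) := by omega
    rw [PySem.List.pyGetD_eq_getElem _ _ h0 (by simpa using (by omega : jj < ((l ++ [x]).length : Int))),
        PySem.List.pyGetD_eq_getElem _ _ h0 (by simpa using h1)]
    rw [List.getElem_append_left (by omega)]
  have hinner :
      (PySem.List.pyRange 0 ((l.length : Int) + 1) 1).foldl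
        (fun ps jj => ps + PySem.List.pyGetD (l ++ [x]) jj 0) 0 = l.sum + x := by
    rw [← hlen]
    rw [PySem.List.foldl_pyRange_zero_pyGetD' (l ++ [x]) 0 (fun ps v => ps + v) 0]
    simp [List.foldl_append, ← List.sum_eq_foldl]
  rw [hcongr]
  simp only [List.foldl_cons, List.foldl_nil]
  rw [hinner]
  ring

lemma rhe_eq_alt (values : List Int) : rhe values = rhe_alt values := by
  induction values using List.reverseRecOn with
  | nil => decide
  | append_singleton l x ih => rw [a_append, alt_append, ih]

-- ===== VERDICT (by name: the statement is the Claim_ definition above) =====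
theorem rhe_spec : Claim_equal_rhe := by
  intro values _
  unfold Spec_rhe
  exact rhe_eq_alt values
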